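-- pv_equiv track=rewrite | github.com/ismip/ismip7-antarctic-ocean-forcing | i7aof/imbie/extend.py | _rasterize_line
-- ===== SOURCE A (Python) =====
-- def _rasterize_line(
--     start: tuple[int, int],
--     goal: tuple[int, int],
-- ) -> list[tuple[int, int]]:
--     """Rasterize a straight line between two integer grid points (Bresenham).
--
--     Returns a list of (y, x) integer coordinates approximating a straight line.
--     """
--     y0, x0 = int(start[0]), int(start[1])
--     y1, x1 = int(goal[0]), int(goal[1])
--     points: list[tuple[int, int]] = []
--     dy = abs(y1 - y0)
--     dx = abs(x1 - x0)
--     sy = 1 if y0 < y1 else -1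
--     sx = 1 if x0 < x1 else -1
--     if dx > dy:
--         err = dx // 2
--         while x0 != x1:
--             points.append((y0, x0))
--             err -= dy
--             if err < 0:
--                 y0 += sy
--                 err += dx
--             x0 += sx
--     else:
--         err = dy // 2
--         while y0 != y1:
--             points.append((y0, x0))
--             err -= dx
--             if err < 0:
--                 x0 += sx
--                 err += dy
--             y0 += sy
--     points.append((y1, x1))
--     return points
-- ===== SOURCE B (Python) =====
-- def _rasterize_line(
--     start: tuple[int, int],
--     goal: tuple[int, int],
-- ) -> list[tuple[int, int]]:
--     """Rasterize a straight line between two integer grid points.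
--
--     Same points as Bresenham, but each point's minor coordinate is computed
--     by a closed-form integer ceiling formula instead of running error state.
--     """
--     y0, x0 = int(start[0]), int(start[1])
--     y1, x1 = int(goal[0]), int(goal[1])
--     dy = abs(y1 - y0)
--     dx = abs(x1 - x0)
--     sy = 1 if y0 < y1 else -1
--     sx = 1 if x0 < x1 else -1
--     if dx > dy:
--         half = dx // 2
--         points = [
--             (y0 + sy * (-((-(k * dy - half)) // dx)), x0 + sx * k)
--             for k in range(dx)
--         ]
--     else:
--         half = dy // 2
--         points = [
--             (y0 + sy * k, x0 + sx * (-((-(k * dx - half)) // dy)))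
--             for k in range(dy)
--         ]
--     points.append((y1, x1))
--     return points
-- ===== Notes on version B (the rewrite author's own statement) =====
-- stated objective: alternative
-- what changed: B replaces Bresenham's accumulated error variable by a direct closed-form integer ceiling formula computing each point's minor coordinate from the step index k, building the list with a range comprehension instead of a while loop with mutable state.
import Mathlib
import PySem

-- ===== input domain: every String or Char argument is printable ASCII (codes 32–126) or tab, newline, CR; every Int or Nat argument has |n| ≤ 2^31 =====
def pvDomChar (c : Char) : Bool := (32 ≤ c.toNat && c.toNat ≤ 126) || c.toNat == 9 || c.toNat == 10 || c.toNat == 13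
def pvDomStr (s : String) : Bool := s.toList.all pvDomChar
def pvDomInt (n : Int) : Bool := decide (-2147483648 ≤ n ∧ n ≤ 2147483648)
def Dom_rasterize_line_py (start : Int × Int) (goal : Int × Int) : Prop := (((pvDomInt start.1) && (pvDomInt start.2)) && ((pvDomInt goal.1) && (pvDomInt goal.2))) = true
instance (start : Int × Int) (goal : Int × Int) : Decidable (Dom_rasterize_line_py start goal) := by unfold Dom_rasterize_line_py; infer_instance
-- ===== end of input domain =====

-- B computes each point's minor coordinate by a closed-form integer ceiling formula instead of
-- Bresenham's running error accumulator (alternative decomposition, same cost).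

-- ===== PORT A =====
-- while x0 != x1 loop of A's dx>dy branch; fuel = number of remaining steps (= |x1-x0| at the top call)
def pvLoopX (fuel : Nat) (y0 x0 x1 dy dx sy sx err : Int) : List (Int × Int) :=
  match fuel with
  | 0 => []
  | f + 1 =>
    if x0 ≠ x1 then
      let err' := err - dy
      if err' < 0 then (y0, x0) :: pvLoopX f (y0 + sy) (x0 + sx) x1 dy dx sy sx (err' + dx)
      else (y0, x0) :: pvLoopX f y0 (x0 + sx) x1 dy dx sy sx err'
    else []

-- while y0 != y1 loop of A's else branch
def pvLoopY (fuel : Nat) (y0 x0 y1 dy dx sy sx err : Int) : List (Int × Int) :=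
  match fuel with
  | 0 => []
  | f + 1 =>
    if y0 ≠ y1 then
      let err' := err - dx
      if err' < 0 then (y0, x0) :: pvLoopY f (y0 + sy) (x0 + sx) y1 dy dx sy sx (err' + dy)
      else (y0, x0) :: pvLoopY f (y0 + sy) x0 y1 dy dx sy sx err'
    else []

def rasterize_line_py (start : Int × Int) (goal : Int × Int) : List (Int × Int) :=
  let y0 := start.1
  let x0 := start.2
  let y1 := goal.1
  let x1 := goal.2
  let dy := |y1 - y0|
  let dx := |x1 - x0|
  let sy : Int := if y0 < y1 then 1 else -1
  let sx : Int := if x0 < x1 then 1 else -1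
  if dx > dy then
    pvLoopX dx.toNat y0 x0 x1 dy dx sy sx (PySem.Int.floordiv dx 2) ++ [(y1, x1)]
  else
    pvLoopY dy.toNat y0 x0 y1 dy dx sy sx (PySem.Int.floordiv dy 2) ++ [(y1, x1)]

-- ===== PORT B =====
-- Python's -((-a) // b): ceiling division
def pvCeilDiv (a b : Int) : Int := -(PySem.Int.floordiv (-a) b)

def rasterize_line_py_alt (start : Int × Int) (goal : Int × Int) : List (Int × Int) :=
  let y0 := start.1
  let x0 := start.2
  let y1 := goal.1
  let x1 := goal.2
  let dy := |y1 - y0|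
  let dx := |x1 - x0|
  let sy : Int := if y0 < y1 then 1 else -1
  let sx : Int := if x0 < x1 then 1 else -1
  if dx > dy then
    let half := PySem.Int.floordiv dx 2
    ((List.range dx.toNat).map
      (fun (k : Nat) => (y0 + sy * pvCeilDiv ((k : Int) * dy - half) dx, x0 + sx * (k : Int))))
      ++ [(y1, x1)]
  else
    let half := PySem.Int.floordiv dy 2
    ((List.range dy.toNat).map
      (fun (k : Nat) => (y0 + sy * (k : Int), x0 + sx * pvCeilDiv ((k : Int) * dx - half) dy)))
      ++ [(y1, x1)]

-- ===== PRECONDITION & SPEC =====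
def Spec_rasterize_line_py (start : Int × Int) (goal : Int × Int) (out : List (Int × Int)) : Prop := out = rasterize_line_py_alt start goal
instance (start : Int × Int) (goal : Int × Int) (out : List (Int × Int)) : Decidable (Spec_rasterize_line_py start goal out) := by unfold Spec_rasterize_line_py; infer_instance

-- ===== CLAIM (what is proved, stated in full; the proofs are below) =====
def Claim_equal_rasterize_line_py : Prop := ∀ (start : Int × Int) (goal : Int × Int), Dom_rasterize_line_py start goal → Spec_rasterize_line_py start goal (rasterize_line_py start goal)

-- ===== LEMMAS AND PROOFS =====

-- B's minor-coordinate offset after k major steps, and the corresponding error value of A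
def pvM (dmin dmaj k : Int) : Int := pvCeilDiv (k * dmin - PySem.Int.floordiv dmaj 2) dmaj
def pvE (dmin dmaj k : Int) : Int :=
  PySem.Int.floordiv dmaj 2 - k * dmin + pvM dmin dmaj k * dmaj

theorem pvE_bounds (dmin dmaj : Int) (hmaj : 0 < dmaj) (k : Int) :
    0 ≤ pvE dmin dmaj k ∧ pvE dmin dmaj k < dmaj := by
  have h := (PySem.Int.neg_floordiv_neg_eq_iff_of_pos
    (a := k * dmin - PySem.Int.floordiv dmaj 2) (b := dmaj)
    (q := pvM dmin dmaj k) hmaj).mp rfl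
  unfold pvE
  constructor <;> nlinarith [h.1, h.2]

theorem pvM_succ_of_neg (dmin dmaj : Int) (hmaj : 0 < dmaj) (hle : dmin ≤ dmaj) (k : Int)
    (h : pvE dmin dmaj k - dmin < 0) :
    pvM dmin dmaj (k + 1) = pvM dmin dmaj k + 1 ∧
      pvE dmin dmaj (k + 1) = pvE dmin dmaj k - dmin + dmaj := by
  have hb := pvE_bounds dmin dmaj hmaj k
  have hm : pvM dmin dmaj (k + 1) = pvM dmin dmaj k + 1 := by
    apply (PySem.Int.neg_floordiv_neg_eq_iff_of_pos
      (a := (k + 1) * dmin - PySem.Int.floordiv dmaj 2) (b := dmaj)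
      (q := pvM dmin dmaj k + 1) hmaj).mpr
    unfold pvE at h hb
    constructor <;> nlinarith [hb.1, hb.2, hle]
  refine ⟨hm, ?_⟩
  unfold pvE
  rw [hm]; ring

theorem pvM_succ_of_nonneg (dmin dmaj : Int) (hmaj : 0 < dmaj) (hmin0 : 0 ≤ dmin) (k : Int)
    (h : ¬ pvE dmin dmaj k - dmin < 0) :
    pvM dmin dmaj (k + 1) = pvM dmin dmaj k ∧
      pvE dmin dmaj (k + 1) = pvE dmin dmaj k - dmin := by
  have hb := pvE_bounds dmin dmaj hmaj k
  have hm : pvM dmin dmaj (k + 1) = pvM dmin dmaj k := by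
    apply (PySem.Int.neg_floordiv_neg_eq_iff_of_pos
      (a := (k + 1) * dmin - PySem.Int.floordiv dmaj 2) (b := dmaj)
      (q := pvM dmin dmaj k) hmaj).mpr
    unfold pvE at h hb
    constructor <;> nlinarith [hb.1, hb.2, hmin0]
  refine ⟨hm, ?_⟩
  unfold pvE
  rw [hm]; ring

theorem pvM_zero (dmin dmaj : Int) (hmaj : 0 < dmaj) : pvM dmin dmaj 0 = 0 := by
  apply (PySem.Int.neg_floordiv_neg_eq_iff_of_pos (b := dmaj) (q := 0) hmaj).mpr
  rw [PySem.Int.floordiv_eq_ediv_of_pos (show (0:Int) < 2 by omega)]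
  refine ⟨?_, ?_⟩ <;> (ring_nf; omega)

theorem pvE_zero (dmin dmaj : Int) (hmaj : 0 < dmaj) :
    pvE dmin dmaj 0 = PySem.Int.floordiv dmaj 2 := by
  unfold pvE
  rw [pvM_zero dmin dmaj hmaj]; ring

-- the error-accumulating loop of A produces exactly B's closed-form points
theorem pvLoopX_run (Y0 X0 dmin dmaj sy sx : Int) (hmaj : 0 < dmaj) (hmin0 : 0 ≤ dmin)
    (hle : dmin ≤ dmaj) (hsx : sx = 1 ∨ sx = -1) :
    ∀ (n : Nat) (k : Int), 0 ≤ k → k + n = dmaj →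
      pvLoopX n (Y0 + sy * pvM dmin dmaj k) (X0 + sx * k) (X0 + sx * dmaj) dmin dmaj sy sx
          (pvE dmin dmaj k)
        = (List.range n).map
            (fun (j : Nat) => (Y0 + sy * pvM dmin dmaj (k + (j : Int)), X0 + sx * (k + (j : Int)))) := by
  intro n
  induction n with
  | zero => intro k _ _; simp [pvLoopX]
  | succ f ih =>
    intro k hk hkn
    have hklt : k < dmaj := by omega
    have hne : X0 + sx * k ≠ X0 + sx * dmaj := by
      rcases hsx with h | h <;> simp [h] <;> omega
    rw [pvLoopX]
    simp only [hne, ne_eq, not_false_iff, if_true]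
    by_cases hc : pvE dmin dmaj k - dmin < 0
    · obtain ⟨hm, he⟩ := pvM_succ_of_neg dmin dmaj hmaj hle k hc
      rw [if_pos hc]
      have hrec := ih (k + 1) (by omega) (by push_cast at hkn ⊢; omega)
      have hy : Y0 + sy * pvM dmin dmaj k + sy = Y0 + sy * pvM dmin dmaj (k + 1) := by
        rw [hm]; ring
      have hx : X0 + sx * k + sx = X0 + sx * (k + 1) := by ring
      rw [hy, hx, ← he, hrec, List.range_succ_eq_map, List.map_cons, List.map_map]
      simp only [Int.natCast_zero, add_zero]
      congr 1
      apply List.map_congr_left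
      intro j _
      simp only [Function.comp_apply]
      push_cast
      ring_nf
    · obtain ⟨hm, he⟩ := pvM_succ_of_nonneg dmin dmaj hmaj hmin0 k hc
      rw [if_neg hc]
      have hrec := ih (k + 1) (by omega) (by push_cast at hkn ⊢; omega)
      have hx : X0 + sx * k + sx = X0 + sx * (k + 1) := by ring
      rw [hm, he, ← hx] at hrec
      rw [hrec, List.range_succ_eq_map, List.map_cons, List.map_map]
      simp only [Int.natCast_zero, add_zero]
      congr 1
      apply List.map_congr_left
      intro j _
      simp only [Function.comp_apply]
      push_cast
      ring_nf

-- A's y-major loop is the x-major loop with the two coordinates swapped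
theorem pvLoopY_eq_swap (fuel : Nat) :
    ∀ (y0 x0 y1 dy dx sy sx err : Int),
      pvLoopY fuel y0 x0 y1 dy dx sy sx err
        = (pvLoopX fuel x0 y0 y1 dx dy sx sy err).map (fun p => (p.2, p.1)) := by
  induction fuel with
  | zero => intro _ _ _ _ _ _ _ _; simp [pvLoopX, pvLoopY]
  | succ f ih =>
    intro y0 x0 y1 dy dx sy sx err
    rw [pvLoopX, pvLoopY]
    by_cases h : y0 ≠ y1
    · simp only [h, ne_eq, not_false_iff, if_true]
      by_cases hc : err - dx < 0 <;> simp [hc, ih]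
    · simp [h]

-- |x1 - x0| moved with the correct sign lands on x1
theorem pv_abs_step (x0 x1 : Int) (_h : x0 ≠ x1) :
    x0 + (if x0 < x1 then (1 : Int) else -1) * |x1 - x0| = x1 := by
  rcases abs_cases (x1 - x0) with ⟨ha, _⟩ | ⟨ha, _⟩ <;> rw [ha] <;> split_ifs <;> omega

-- ===== VERDICT (by name: the statement is the Claim_ definition above) =====
theorem rasterize_line_py_spec : Claim_equal_rasterize_line_py := by
  intro start goal _
  unfold Spec_rasterize_line_py rasterize_line_py rasterize_line_py_alt
  obtain ⟨y0, x0⟩ := start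
  obtain ⟨y1, x1⟩ := goal
  simp only
  set dy : Int := |y1 - y0| with hdy
  set dx : Int := |x1 - x0| with hdx
  set sy : Int := if y0 < y1 then 1 else -1 with hsy
  set sx : Int := if x0 < x1 then 1 else -1 with hsx
  have hdy0 : 0 ≤ dy := abs_nonneg _
  have hdx0 : 0 ≤ dx := abs_nonneg _
  have hsx1 : sx = 1 ∨ sx = -1 := by rw [hsx]; split_ifs <;> simp
  have hsy1 : sy = 1 ∨ sy = -1 := by rw [hsy]; split_ifs <;> simp
  by_cases hb : dx > dy
  · have hdxpos : 0 < dx := by omega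
    have hxne : x0 ≠ x1 := by
      intro h; rw [hdx, h] at hdxpos; simp at hdxpos
    have hx1 : x0 + sx * dx = x1 := pv_abs_step x0 x1 hxne
    simp only [hb, if_true]
    have h0 := pvLoopX_run y0 x0 dy dx sy sx hdxpos hdy0 (by omega) hsx1 dx.toNat 0
      (le_refl 0) (by omega)
    rw [pvM_zero dy dx hdxpos, pvE_zero dy dx hdxpos] at h0
    simp only [mul_zero, add_zero, hx1] at h0
    rw [h0]
    congr 1
    apply List.map_congr_left
    intro j _
    simp [pvM, zero_add]
  · simp only [hb, if_false]
    by_cases hdyz : dy = 0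
    · have hdxz : dx = 0 := by omega
      simp [hdyz, hdxz, pvLoopY]
    · have hdypos : 0 < dy := by omega
      have hyne : y0 ≠ y1 := by
        intro h; rw [hdy, h] at hdypos; simp at hdypos
      have hy1 : y0 + sy * dy = y1 := pv_abs_step y0 y1 hyne
      rw [pvLoopY_eq_swap]
      have h0 := pvLoopX_run x0 y0 dx dy sx sy hdypos hdx0 (by omega) hsy1 dy.toNat 0
        (le_refl 0) (by omega)
      rw [pvM_zero dx dy hdypos, pvE_zero dx dy hdypos] at h0
      simp only [mul_zero, add_zero, hy1] at h0
      rw [h0, List.map_map]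
      congr 1
      apply List.map_congr_left
      intro j _
      simp [pvM, zero_add]
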